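-- pv_equiv track=rewrite | github.com/dakshhkhatri/1696_TAFL | app.py | reachable_states
-- ===== SOURCE A (Python) =====
-- from collections import deque, defaultdict
--
-- def reachable_states(start, transitions):
--     g = defaultdict(list)
--     for t in transitions:
--         g[t['from']].append(t['to'])
--
--     vis = {start}
--     q = deque([start])
--
--     while q:
--         u = q.popleft()
--         for v in g[u]:
--             if v not in vis:
--                 vis.add(v)
--                 q.append(v)
--
--     return vis
-- ===== SOURCE B (Python) =====
-- def reachable_states(start, transitions):
--     vis = {start}
--     frontier = [start]
--     while frontier:
--         nxt = []
--         for u in frontier: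
--             for t in transitions:
--                 if t['from'] == u and t['to'] not in vis:
--                     vis.add(t['to'])
--                     nxt.append(t['to'])
--         frontier = nxt
--     return vis
-- ===== Notes on version B (the rewrite author's own statement) =====
-- stated objective: alternative
-- what changed: Replaces the adjacency defaultdict and deque worklist by a level-synchronous frontier loop that rescans the whole transition list for each frontier node until no new state appears, building no index and no queue.
import Mathlib
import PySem

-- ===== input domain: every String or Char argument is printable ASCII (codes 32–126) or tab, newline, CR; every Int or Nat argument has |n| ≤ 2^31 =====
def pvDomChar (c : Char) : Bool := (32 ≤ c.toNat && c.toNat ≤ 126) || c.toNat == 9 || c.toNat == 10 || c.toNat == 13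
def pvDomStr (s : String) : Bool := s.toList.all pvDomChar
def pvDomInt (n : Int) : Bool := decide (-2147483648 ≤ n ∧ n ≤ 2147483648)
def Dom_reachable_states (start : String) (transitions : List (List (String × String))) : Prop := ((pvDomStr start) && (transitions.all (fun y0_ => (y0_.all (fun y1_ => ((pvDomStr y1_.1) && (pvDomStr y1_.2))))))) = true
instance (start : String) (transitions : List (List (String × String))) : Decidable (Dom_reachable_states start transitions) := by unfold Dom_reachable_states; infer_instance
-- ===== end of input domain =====

-- B replaces A's adjacency defaultdict + deque BFS by a level-synchronous frontier loop that
-- rescans the whole transition list for each frontier node (no index, no queue); same return value.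

-- shared accessors: t['from'] / t['to'] — exact under Pre_ (both keys present in every transition)
def pvFromOf (t : List (String × String)) : String := PySem.Dict.getD (PySem.Dict.mk t) "from" ""
def pvToOf (t : List (String × String)) : String := PySem.Dict.getD (PySem.Dict.mk t) "to" ""

-- ===== PORT A =====
-- g = defaultdict(list); for t in transitions: g[t['from']].append(t['to'])
-- (defaultdict __getitem__-then-append = Dict.modify with default [])
def pvBuildG (transitions : List (List (String × String))) : PySem.Dict String (List String) :=
  transitions.foldl (fun d t => PySem.Dict.modify d (pvFromOf t) [] (fun l => l ++ [pvToOf t])) PySem.Dict.empty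

-- body of 'for v in g[u]: if v not in vis: vis.add(v); q.append(v)'
def pvInnerA (st : PySem.Set String × List String) (v : String) : PySem.Set String × List String :=
  if PySem.Set.contains st.1 v then st else (PySem.Set.add st.1 v, st.2 ++ [v])

-- the while loop; fuel counts pops, transitions.length + 1 bounds the number of enqueued nodes
-- (reading g[u] on a missing key only inserts [], which cannot change the result: ported as getD)
def pvLoopA (g : PySem.Dict String (List String)) : Nat → PySem.Set String → List String → PySem.Set String
  | 0, vis, _ => vis
  | _ + 1, vis, [] => vis
  | f + 1, vis, u :: rest =>
      let st := (PySem.Dict.getD g u []).foldl pvInnerA (vis, rest)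
      pvLoopA g f st.1 st.2

def reachable_states (start : String) (transitions : List (List (String × String))) : List String :=
  pvLoopA (pvBuildG transitions) (transitions.length + 1) (PySem.Set.ofList [start]) [start]

-- ===== PORT B =====
-- body of "for t in transitions: if t['from'] == u and t['to'] not in vis: vis.add(t['to']); nxt.append(t['to'])"
def pvInnerB (u : String) (st : PySem.Set String × List String) (t : List (String × String)) : PySem.Set String × List String :=
  if pvFromOf t == u then
    (if PySem.Set.contains st.1 (pvToOf t) then st else (PySem.Set.add st.1 (pvToOf t), st.2 ++ [pvToOf t]))
  else st

-- one frontier node u: a full pass over the transition list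
def pvStepNode (transitions : List (List (String × String))) (st : PySem.Set String × List String) (u : String) : PySem.Set String × List String :=
  transitions.foldl (pvInnerB u) st

-- 'while frontier:' — fuel counts rounds; each non-final round discovers a new state, so
-- transitions.length + 1 rounds suffice
def pvLoopB (transitions : List (List (String × String))) : Nat → PySem.Set String → List String → PySem.Set String
  | 0, vis, _ => vis
  | f + 1, vis, front =>
      if front.isEmpty then vis
      else
        let st := front.foldl (pvStepNode transitions) (vis, [])
        pvLoopB transitions f st.1 st.2

def reachable_states_alt (start : String) (transitions : List (List (String × String))) : List String :=
  pvLoopB transitions (transitions.length + 1) (PySem.Set.ofList [start]) [start]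

-- ===== PRECONDITION & SPEC =====
-- A evaluates t['from'] and t['to'] for every transition t and raises KeyError when either key is
-- missing; Pre_ excludes exactly those inputs.
def Pre_reachable_states (start : String) (transitions : List (List (String × String))) : Prop :=
  ∀ t ∈ transitions, (PySem.Dict.get? (PySem.Dict.mk t) "from").isSome = true ∧ (PySem.Dict.get? (PySem.Dict.mk t) "to").isSome = true
instance (start : String) (transitions : List (List (String × String))) : Decidable (Pre_reachable_states start transitions) := by unfold Pre_reachable_states; infer_instance
def pvWitness_reachable_states : String × (List (List (String × String))) :=
  ("a", [[("from", "a"), ("to", "b")], [("from", "b"), ("to", "c")]])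

def Spec_reachable_states (start : String) (transitions : List (List (String × String))) (out : List String) : Prop := out = reachable_states_alt start transitions
instance (start : String) (transitions : List (List (String × String))) (out : List String) : Decidable (Spec_reachable_states start transitions out) := by unfold Spec_reachable_states; infer_instance

-- ===== CLAIM (what is proved, stated in full; the proofs are below) =====
def Claim_equal_reachable_states : Prop := ∀ (start : String) (transitions : List (List (String × String))), Dom_reachable_states start transitions → Pre_reachable_states start transitions → Spec_reachable_states start transitions (reachable_states start transitions)

-- ===== LEMMAS AND PROOFS =====

-- the adjacency list A builds for u is exactly the to-fields of the transitions whose from-field is u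
theorem pvBuildG_getD (transitions : List (List (String × String))) (u : String) :
    PySem.Dict.getD (pvBuildG transitions) u []
      = (transitions.filter (fun t => pvFromOf t == u)).map pvToOf := by
  have h : pvBuildG transitions
      = (transitions.map (fun t => (pvFromOf t, pvToOf t))).foldl
          (fun d p => PySem.Dict.modify d p.1 [] (fun l => l ++ [p.2])) PySem.Dict.empty := by
    rw [List.foldl_map]; rfl
  rw [h, PySem.Dict.getD_foldl_modify_append]
  simp only [List.filter_map, List.map_map]; rfl

-- folding pvInnerA over the filtered-and-mapped list is folding pvInnerB over the raw list
theorem pvFoldA_eq_foldB (u : String) (L : List (List (String × String))) (st : PySem.Set String × List String) :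
    ((L.filter (fun t => pvFromOf t == u)).map pvToOf).foldl pvInnerA st = L.foldl (pvInnerB u) st := by
  induction L generalizing st with
  | nil => rfl
  | cons t L ih =>
    by_cases h : (pvFromOf t == u) = true
    · simp only [List.filter_cons, h, if_true, List.map_cons, List.foldl_cons]
      rw [ih]
      congr 1
      simp [pvInnerB, pvInnerA, h]
    · simp only [List.filter_cons, h, if_false, List.foldl_cons, Bool.false_eq_true]
      rw [ih]
      congr 1
      simp [pvInnerB, h]

-- the queue/nxt component only ever receives appends, independent of what is already there
theorem pvFoldB_append (u : String) (L : List (List (String × String))) (s : PySem.Set String) (l : List String) :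
    L.foldl (pvInnerB u) (s, l)
      = ((L.foldl (pvInnerB u) (s, [])).1, l ++ (L.foldl (pvInnerB u) (s, [])).2) := by
  induction L generalizing s l with
  | nil => simp
  | cons t L ih =>
    simp only [List.foldl_cons]
    by_cases h : (pvFromOf t == u) = true
    · by_cases hc : (PySem.Set.contains s (pvToOf t)) = true
      · simp only [pvInnerB, h, if_true, hc, ih s l]
      · simp only [pvInnerB, h, if_true, hc, Bool.false_eq_true, if_false]
        rw [ih (PySem.Set.add s (pvToOf t)) (l ++ [pvToOf t]),
            ih (PySem.Set.add s (pvToOf t)) ([] ++ [pvToOf t])]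
        simp
    · simp only [pvInnerB, h, Bool.false_eq_true, if_false, ih s l]

-- the visited set only grows
theorem pvFoldB_subset (u : String) (L : List (List (String × String))) (st : PySem.Set String × List String)
    (x : String) (hx : x ∈ st.1) : x ∈ (L.foldl (pvInnerB u) st).1 := by
  induction L generalizing st with
  | nil => exact hx
  | cons t L ih =>
    refine ih _ ?_
    simp only [pvInnerB]
    split
    · split
      · exact hx
      · simp only [PySem.Set.mem_add]; exact Or.inl hx
    · exact hx

def pvCap (L : List (List (String × String))) (s : PySem.Set String) : Nat :=
  L.countP (fun t => !(PySem.Set.contains s (pvToOf t)))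

theorem pvCap_mono (L : List (List (String × String))) (s s' : PySem.Set String)
    (h : ∀ x ∈ s, x ∈ s') : pvCap L s' ≤ pvCap L s := by
  refine List.countP_mono_left ?_
  intro t _ ht
  simp only [Bool.not_eq_eq_eq_not, Bool.not_true, PySem.Set.contains_eq_listContains] at ht ⊢
  simp only [List.contains_eq_mem, decide_eq_false_iff_not] at ht ⊢
  exact fun hm => ht (h _ hm)

-- potential argument: appended nodes are paid for by transitions leaving the unseen-target count
theorem pvFoldB_cap (u : String) (L : List (List (String × String))) (s : PySem.Set String) (l : List String) :
    ((L.foldl (pvInnerB u) (s, l)).2).length + pvCap L (L.foldl (pvInnerB u) (s, l)).1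
      ≤ l.length + pvCap L s := by
  induction L generalizing s l with
  | nil => simp [pvCap]
  | cons t L ih =>
    simp only [List.foldl_cons, pvCap, List.countP_cons] at *
    have hsub : ∀ (st : PySem.Set String × List String) (x : String), x ∈ st.1 →
        x ∈ (L.foldl (pvInnerB u) st).1 := fun st x hx => pvFoldB_subset u L st x hx
    by_cases h : (pvFromOf t == u) = true
    · by_cases hc : pvToOf t ∈ s
      · have hstep : pvInnerB u (s, l) t = (s, l) := by simp [pvInnerB, h, hc]
        rw [hstep]
        have hF1 : pvToOf t ∈ (L.foldl (pvInnerB u) (s, l)).1 := hsub _ _ hc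
        have := ih s l
        simp only [PySem.Set.contains_eq_listContains, List.contains_eq_mem,
          decide_eq_true hc, decide_eq_true hF1, Bool.not_true, Bool.false_eq_true, if_false]
          at this ⊢
        omega
      · have hstep : pvInnerB u (s, l) t
            = (PySem.Set.add s (pvToOf t), l ++ [pvToOf t]) := by simp [pvInnerB, h, hc]
        rw [hstep]
        have hF1 : pvToOf t ∈
            (L.foldl (pvInnerB u) (PySem.Set.add s (pvToOf t), l ++ [pvToOf t])).1 :=
          hsub _ _ (by simp [PySem.Set.mem_add])
        have hmono : pvCap L (PySem.Set.add s (pvToOf t)) ≤ pvCap L s :=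
          pvCap_mono L s _ (fun x hx => by simp [PySem.Set.mem_add, hx])
        have := ih (PySem.Set.add s (pvToOf t)) (l ++ [pvToOf t])
        simp only [pvCap, List.length_append, List.length_cons, List.length_nil] at this hmono
        simp only [PySem.Set.contains_eq_listContains, List.contains_eq_mem,
          decide_eq_true hF1, decide_eq_false hc, Bool.not_true, Bool.not_false,
          if_true, Bool.false_eq_true, if_false] at this hmono ⊢
        omega
    · have hstep : pvInnerB u (s, l) t = (s, l) := by simp [pvInnerB, h]
      rw [hstep]
      have := ih s l
      have hct : (if !(PySem.Set.contains (L.foldl (pvInnerB u) (s, l)).1 (pvToOf t)) then 1 else 0)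
          ≤ (if !(PySem.Set.contains s (pvToOf t)) then 1 else 0) := by
        by_cases hc : pvToOf t ∈ s
        · have hF1 : pvToOf t ∈ (L.foldl (pvInnerB u) (s, l)).1 := hsub _ _ hc
          simp only [PySem.Set.contains_eq_listContains, List.contains_eq_mem,
            decide_eq_true hc, decide_eq_true hF1, Bool.not_true, Bool.false_eq_true, if_false]
          omega
        · simp only [PySem.Set.contains_eq_listContains, List.contains_eq_mem,
            decide_eq_false hc, Bool.not_false, if_true]
          split <;> omega
      simp only [PySem.Set.contains_eq_listContains, List.contains_eq_mem] at this hct ⊢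
      omega

theorem pvRound_cap (transitions : List (List (String × String))) (front : List String)
    (s : PySem.Set String) (l : List String) :
    ((front.foldl (pvStepNode transitions) (s, l)).2).length
        + pvCap transitions (front.foldl (pvStepNode transitions) (s, l)).1
      ≤ l.length + pvCap transitions s := by
  induction front generalizing s l with
  | nil => simp
  | cons u front ih =>
    simp only [List.foldl_cons, pvStepNode]
    calc ((front.foldl (pvStepNode transitions) (transitions.foldl (pvInnerB u) (s, l))).2).length
          + pvCap transitions (front.foldl (pvStepNode transitions) (transitions.foldl (pvInnerB u) (s, l))).1
        ≤ ((transitions.foldl (pvInnerB u) (s, l)).2).length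
            + pvCap transitions (transitions.foldl (pvInnerB u) (s, l)).1 := by
          have := ih (transitions.foldl (pvInnerB u) (s, l)).1 (transitions.foldl (pvInnerB u) (s, l)).2
          simpa using this
      _ ≤ l.length + pvCap transitions s := pvFoldB_cap u transitions s l

-- bridge: popping a whole level off A's queue is one frontier round of B
theorem pvBridge (transitions : List (List (String × String))) (front : List String) :
    ∀ (f : Nat) (vis : PySem.Set String) (acc : List String),
    pvLoopA (pvBuildG transitions) (front.length + f) vis (front ++ acc)
      = pvLoopA (pvBuildG transitions) f
          (front.foldl (pvStepNode transitions) (vis, acc)).1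
          (front.foldl (pvStepNode transitions) (vis, acc)).2 := by
  induction front with
  | nil => intro f vis acc; simp
  | cons u front ih =>
    intro f vis acc
    rw [List.cons_append,
        show (u :: front).length + f = (front.length + f) + 1 by simp [Nat.add_right_comm]]
    simp only [pvLoopA]
    rw [pvBuildG_getD, pvFoldA_eq_foldB, pvFoldB_append u transitions vis (front ++ acc),
        List.append_assoc, ih]
    simp only [List.foldl_cons, pvStepNode]
    rw [pvFoldB_append u transitions vis acc]

theorem pvLoopA_nil (g : PySem.Dict String (List String)) (f : Nat) (vis : PySem.Set String) :
    pvLoopA g f vis [] = vis := by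
  cases f <;> rfl

theorem pvLoopB_nil (transitions : List (List (String × String))) (f : Nat) (vis : PySem.Set String) :
    pvLoopB transitions f vis [] = vis := by
  cases f <;> simp [pvLoopB]

-- main lemma: with enough fuel on both sides the two loops agree
theorem pvMain (transitions : List (List (String × String))) :
    ∀ (fB fA : Nat) (vis : PySem.Set String) (front : List String),
    front.length + pvCap transitions vis ≤ fA → pvCap transitions vis < fB →
    pvLoopA (pvBuildG transitions) fA vis front = pvLoopB transitions fB vis front := by
  intro fB
  induction fB with
  | zero => intro fA vis front _ h2; omega
  | succ fB ih =>
    intro fA vis front h1 h2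
    cases front with
    | nil => rw [pvLoopA_nil, pvLoopB_nil]
    | cons u fr =>
      have hlen : (u :: fr).length + pvCap transitions vis ≤ fA := h1
      have hfa : fA = (u :: fr).length + (fA - (u :: fr).length) := by omega
      have hbr := pvBridge transitions (u :: fr) (fA - (u :: fr).length) vis []
      rw [List.append_nil] at hbr
      rw [hfa, hbr]
      have hB : pvLoopB transitions (fB + 1) vis (u :: fr)
          = pvLoopB transitions fB
              ((u :: fr).foldl (pvStepNode transitions) (vis, [])).1
              ((u :: fr).foldl (pvStepNode transitions) (vis, [])).2 := by
        simp [pvLoopB]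
      rw [hB]
      have hcap := pvRound_cap transitions (u :: fr) vis []
      by_cases hemp : ((u :: fr).foldl (pvStepNode transitions) (vis, [])).2 = []
      · rw [hemp, pvLoopA_nil, pvLoopB_nil]
      · have hlen1 : 1 ≤ ((u :: fr).foldl (pvStepNode transitions) (vis, [])).2.length := by
          cases h : ((u :: fr).foldl (pvStepNode transitions) (vis, [])).2 with
          | nil => exact absurd h hemp
          | cons a rest => exact Nat.succ_le_succ (Nat.zero_le _)
        refine ih _ _ _ ?_ ?_
        · simp only [List.length_nil, Nat.zero_add] at hcap
          omega
        · simp only [List.length_nil, Nat.zero_add] at hcap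
          omega

-- ===== VERDICT (by name: the statement is the Claim_ definition above) =====
theorem reachable_states_spec : Claim_equal_reachable_states := by
  intro start transitions _ _
  unfold Spec_reachable_states reachable_states reachable_states_alt
  refine pvMain transitions _ _ _ _ ?_ ?_
  · have := List.countP_le_length (l := transitions) (p := fun t => !(PySem.Set.contains (PySem.Set.ofList [start]) (pvToOf t)))
    simp only [pvCap, List.length_cons, List.length_nil]
    omega
  · have := List.countP_le_length (l := transitions) (p := fun t => !(PySem.Set.contains (PySem.Set.ofList [start]) (pvToOf t)))
    simp only [pvCap]
    omega
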